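-- pv_equiv track=rewrite | github.com/maayav/solaris-agent | old swarm/swarm module/Blue_team/solaris-agent/vibecheck/worker/scan_worker_updated.py | _map_severity
-- ===== SOURCE A (Python) =====
-- def _map_severity(vuln_type: str) -> str:
--     severity_map = {
--         "sql_injection": "critical",
--         "sqli": "critical",
--         "command_injection": "critical",
--         "code_injection": "critical",
--         "hardcoded_jwt": "critical",
--         "xss": "high",
--         "ssrf": "high",
--         "hardcoded_secret": "high",
--         "prototype_pollution": "high",
--         "path_traversal": "high",
--         "missing_auth": "high",
--         "jwt_issue": "high",
--         "mass_assignment": "high",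
--         "open_redirect": "medium",
--         "n_plus_1": "medium",
--         "csrf": "medium",
--         "security_misconfiguration": "medium",
--         "weak_crypto": "medium",
--         "weak_random": "medium",
--         "cors_misconfiguration": "medium",
--     }
--     vuln_lower = (vuln_type or "").lower()
--     for key, severity in severity_map.items():
--         if key in vuln_lower:
--             return severity
--     return "medium"
-- ===== SOURCE B (Python) =====
-- def _map_severity(vuln_type: str) -> str:
--     # Rank every key: 0 = critical, 1 = high, 2 = medium.  Instead of returning at the
--     # first matching key, aggregate: take the MINIMUM rank over ALL matching keys
--     # (order-independent), defaulting to 2 (medium) when nothing matches.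
--     rank = {
--         "sql_injection": 0, "sqli": 0, "command_injection": 0, "code_injection": 0,
--         "hardcoded_jwt": 0,
--         "xss": 1, "ssrf": 1, "hardcoded_secret": 1, "prototype_pollution": 1,
--         "path_traversal": 1, "missing_auth": 1, "jwt_issue": 1, "mass_assignment": 1,
--         "open_redirect": 2, "n_plus_1": 2, "csrf": 2, "security_misconfiguration": 2,
--         "weak_crypto": 2, "weak_random": 2, "cors_misconfiguration": 2,
--     }
--     s = (vuln_type or "").lower()
--     best = min((r for k, r in rank.items() if k in s), default=2)
--     return "critical" if best == 0 else "high" if best == 1 else "medium"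
-- ===== Notes on version B (the rewrite author's own statement) =====
-- stated objective: alternative
-- what changed: Replaces A's ordered first-match loop (return the severity of the first dict key occurring in the lowered input) by an order-independent aggregation: rank every key 0/1/2, take the minimum rank over ALL matching keys with min(..., default=2), and map that rank back to a label; equivalent because A's dict lists keys in ascending rank order, so the first match always carries the minimal rank.
import Mathlib
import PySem

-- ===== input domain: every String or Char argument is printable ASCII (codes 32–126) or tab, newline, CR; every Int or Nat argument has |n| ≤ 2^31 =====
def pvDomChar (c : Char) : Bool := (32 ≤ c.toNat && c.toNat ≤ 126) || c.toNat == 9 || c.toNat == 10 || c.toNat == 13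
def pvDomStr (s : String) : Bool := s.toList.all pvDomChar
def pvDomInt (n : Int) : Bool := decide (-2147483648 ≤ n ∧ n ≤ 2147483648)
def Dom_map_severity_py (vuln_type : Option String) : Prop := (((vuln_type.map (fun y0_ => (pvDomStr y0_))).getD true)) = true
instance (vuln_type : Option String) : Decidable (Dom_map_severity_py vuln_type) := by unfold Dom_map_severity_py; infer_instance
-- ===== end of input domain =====

-- B replaces A's ordered first-match loop by an order-independent aggregation: rank every
-- key 0/1/2, take the minimum rank over all matching keys (default 2), map the rank back.

-- ===== PORT A =====
-- the dict literal, in insertion order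
def sevMapA : PySem.Dict String String := PySem.Dict.ofList
  [ ("sql_injection", "critical"), ("sqli", "critical"), ("command_injection", "critical"),
    ("code_injection", "critical"), ("hardcoded_jwt", "critical"),
    ("xss", "high"), ("ssrf", "high"), ("hardcoded_secret", "high"),
    ("prototype_pollution", "high"), ("path_traversal", "high"), ("missing_auth", "high"),
    ("jwt_issue", "high"), ("mass_assignment", "high"),
    ("open_redirect", "medium"), ("n_plus_1", "medium"), ("csrf", "medium"),
    ("security_misconfiguration", "medium"), ("weak_crypto", "medium"),
    ("weak_random", "medium"), ("cors_misconfiguration", "medium") ]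

-- the 'for key, severity in …: if key in vuln_lower: return severity' loop
def sevLoopA (vuln_lower : String) : List (String × String) → String
  | [] => "medium"
  | (key, severity) :: rest =>
      if PySem.Str.isIn key vuln_lower then severity else sevLoopA vuln_lower rest

def map_severity_py (vuln_type : Option String) : String :=
  -- (vuln_type or "") : None and "" are both falsy, giving ""
  let vuln_lower := PySem.Str.lower (if (vuln_type.getD "") == "" then "" else vuln_type.getD "")
  sevLoopA vuln_lower sevMapA.items

-- ===== PORT B =====
-- the rank dict literal: 0 = critical, 1 = high, 2 = medium
def rankMapB : PySem.Dict String Int := PySem.Dict.ofList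
  [ ("sql_injection", 0), ("sqli", 0), ("command_injection", 0), ("code_injection", 0),
    ("hardcoded_jwt", 0),
    ("xss", 1), ("ssrf", 1), ("hardcoded_secret", 1), ("prototype_pollution", 1),
    ("path_traversal", 1), ("missing_auth", 1), ("jwt_issue", 1), ("mass_assignment", 1),
    ("open_redirect", 2), ("n_plus_1", 2), ("csrf", 2), ("security_misconfiguration", 2),
    ("weak_crypto", 2), ("weak_random", 2), ("cors_misconfiguration", 2) ]

def map_severity_py_alt (vuln_type : Option String) : String :=
  let s := PySem.Str.lower (if (vuln_type.getD "") == "" then "" else vuln_type.getD "")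
  -- min((r for k, r in rank.items() if k in s), default=2)
  let matched := rankMapB.items.filterMap
    (fun kr => if PySem.Str.isIn kr.1 s then some kr.2 else none)
  let best := (PySem.List.min? matched (fun x => x)).getD 2
  if best == 0 then "critical" else if best == 1 then "high" else "medium"

-- ===== PRECONDITION & SPEC =====
def Spec_map_severity_py (vuln_type : Option String) (out : String) : Prop := out = map_severity_py_alt vuln_type
instance (vuln_type : Option String) (out : String) : Decidable (Spec_map_severity_py vuln_type out) := by unfold Spec_map_severity_py; infer_instance

-- ===== CLAIM (what is proved, stated in full; the proofs are below) =====
def Claim_equal_map_severity_py : Prop := ∀ (vuln_type : Option String), Dom_map_severity_py vuln_type → Spec_map_severity_py vuln_type (map_severity_py vuln_type)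

-- ===== LEMMAS AND PROOFS =====
-- grouped key lists (proof-only helpers)
def critKeys : List String :=
  ["sql_injection", "sqli", "command_injection", "code_injection", "hardcoded_jwt"]
def highKeys : List String :=
  ["xss", "ssrf", "hardcoded_secret", "prototype_pollution", "path_traversal",
   "missing_auth", "jwt_issue", "mass_assignment"]
def medKeys : List String :=
  ["open_redirect", "n_plus_1", "csrf", "security_misconfiguration",
   "weak_crypto", "weak_random", "cors_misconfiguration"]

-- both dicts have distinct keys, so .items is the grouped literal list
set_option maxHeartbeats 2000000 in
theorem sevMapA_items_grouped : sevMapA.items =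
    critKeys.map (fun k => (k, "critical")) ++
    highKeys.map (fun k => (k, "high")) ++
    medKeys.map (fun k => (k, "medium")) := by decide

set_option maxHeartbeats 2000000 in
theorem rankMapB_items_grouped : rankMapB.items =
    critKeys.map (fun k => (k, (0 : Int))) ++
    highKeys.map (fun k => (k, (1 : Int))) ++
    medKeys.map (fun k => (k, (2 : Int))) := by decide

-- A's first-match loop over a constant-severity run behaves like one any-scan
theorem sevLoopA_const (vl s : String) (l : List String) (rest : List (String × String)) :
    sevLoopA vl (l.map (fun k => (k, s)) ++ rest) =
      if l.any (fun k => PySem.Str.isIn k vl) then s else sevLoopA vl rest := by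
  induction l with
  | nil => simp
  | cons k t ih =>
    simp only [List.map_cons, List.cons_append, sevLoopA, List.any_cons, ih]
    by_cases h : PySem.Str.isIn k vl = true
    · rw [if_pos h, if_pos (by simp only [h, Bool.true_or])]
    · have hf : PySem.Str.isIn k vl = false := by simpa using h
      rw [if_neg h]
      simp only [hf, Bool.false_or]

-- a guarded constant filterMap is a filter followed by a constant map
theorem filterMap_if_const {α β : Type} (p : α → Bool) (v : β) (l : List α) :
    l.filterMap (fun k => if p k then some v else none) =
      (l.filter p).map (fun _ => v) := by
  induction l with
  | nil => rfl
  | cons x t ih => by_cases h : p x = true <;> simp [h, ih]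

-- B's matched list, grouped: each group contributes its constant rank once per match
theorem matched_grouped (s : String) :
    rankMapB.items.filterMap (fun kr => if PySem.Str.isIn kr.1 s then some kr.2 else none) =
      (critKeys.filter (fun k => PySem.Str.isIn k s)).map (fun _ => (0 : Int)) ++
      (highKeys.filter (fun k => PySem.Str.isIn k s)).map (fun _ => (1 : Int)) ++
      (medKeys.filter (fun k => PySem.Str.isIn k s)).map (fun _ => (2 : Int)) := by
  rw [rankMapB_items_grouped]
  simp only [List.filterMap_append, List.filterMap_map]
  rw [List.append_assoc, ← List.append_assoc]
  exact congrArg₂ _ (congrArg₂ _ (filterMap_if_const _ _ _) (filterMap_if_const _ _ _))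
    (filterMap_if_const _ _ _)

-- the min-with-default over a 0*,1*,2* concatenation is decided by which group is nonempty
theorem min_grouped (a b c : List String) (p : String → Bool) :
    ((PySem.List.min? ((a.filter p).map (fun _ => (0 : Int)) ++
        (b.filter p).map (fun _ => (1 : Int)) ++
        (c.filter p).map (fun _ => (2 : Int))) (fun x => x)).getD 2) =
      if a.any p then 0 else if b.any p then 1 else 2 := by
  set l := (a.filter p).map (fun _ => (0 : Int)) ++
        (b.filter p).map (fun _ => (1 : Int)) ++
        (c.filter p).map (fun _ => (2 : Int)) with hl
  by_cases ha : a.any p = true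
  · -- 0 is in l, so the min is 0
    rw [List.any_eq_true] at ha
    obtain ⟨k, hk, hpk⟩ := ha
    have h0 : (0 : Int) ∈ l :=
      List.mem_append.mpr (Or.inl (List.mem_append.mpr (Or.inl
        (List.mem_map.mpr ⟨k, List.mem_filter.mpr ⟨hk, hpk⟩, rfl⟩))))
    cases hm : PySem.List.min? l (fun x => x) with
    | none =>
      rw [PySem.List.min?_eq_none_iff] at hm
      rw [hm] at h0; cases h0
    | some m =>
      have hle := PySem.List.min?_isMin hm 0 h0
      have hmm := PySem.List.min?_mem hm
      have hval : m = 0 ∨ m = 1 ∨ m = 2 := by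
        rcases List.mem_append.mp hmm with h | h
        · rcases List.mem_append.mp h with h | h <;>
            obtain ⟨_, _, hh⟩ := List.mem_map.mp h <;> omega
        · obtain ⟨_, _, hh⟩ := List.mem_map.mp h; omega
      rw [if_pos (List.any_eq_true.mpr ⟨k, hk, hpk⟩)]
      simp only [Option.getD_some]
      omega
  · -- a contributes nothing
    have hfa : a.filter p = [] := by
      rw [List.filter_eq_nil_iff]
      intro x hx hpx
      exact ha (List.any_eq_true.mpr ⟨x, hx, hpx⟩)
    rw [if_neg ha]
    by_cases hb : b.any p = true
    · rw [List.any_eq_true] at hb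
      obtain ⟨k, hk, hpk⟩ := hb
      have h1 : (1 : Int) ∈ l :=
        List.mem_append.mpr (Or.inl (List.mem_append.mpr (Or.inr
          (List.mem_map.mpr ⟨k, List.mem_filter.mpr ⟨hk, hpk⟩, rfl⟩))))
      cases hm : PySem.List.min? l (fun x => x) with
      | none =>
        rw [PySem.List.min?_eq_none_iff] at hm
        rw [hm] at h1; cases h1
      | some m =>
        have hle := PySem.List.min?_isMin hm 1 h1
        have hmm := PySem.List.min?_mem hm
        have hval : m = 1 ∨ m = 2 := by
          rw [hl, hfa, List.map_nil, List.nil_append] at hmm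
          rcases List.mem_append.mp hmm with h | h <;>
            obtain ⟨_, _, hh⟩ := List.mem_map.mp h <;> omega
        rw [if_pos (List.any_eq_true.mpr ⟨k, hk, hpk⟩)]
        simp only [Option.getD_some]
        omega
    · have hfb : b.filter p = [] := by
        rw [List.filter_eq_nil_iff]
        intro x hx hpx
        exact hb (List.any_eq_true.mpr ⟨x, hx, hpx⟩)
      rw [if_neg hb]
      cases hm : PySem.List.min? l (fun x => x) with
      | none => rfl
      | some m =>
        have hmm := PySem.List.min?_mem hm
        rw [hl, hfa, hfb, List.map_nil, List.map_nil, List.nil_append, List.nil_append] at hmm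
        obtain ⟨_, _, hh⟩ := List.mem_map.mp hmm
        simp [← hh]

-- the two ports agree at every lowered string
theorem core_eq (vl : String) :
    sevLoopA vl sevMapA.items =
      (let matched := rankMapB.items.filterMap
          (fun kr => if PySem.Str.isIn kr.1 vl then some kr.2 else none)
       let best := (PySem.List.min? matched (fun x => x)).getD 2
       if best == 0 then "critical" else if best == 1 then "high" else "medium") := by
  show sevLoopA vl sevMapA.items =
      (if ((PySem.List.min? (rankMapB.items.filterMap
            (fun kr => if PySem.Str.isIn kr.1 vl then some kr.2 else none)) (fun x => x)).getD 2) == 0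
       then "critical"
       else if ((PySem.List.min? (rankMapB.items.filterMap
            (fun kr => if PySem.Str.isIn kr.1 vl then some kr.2 else none)) (fun x => x)).getD 2) == 1
       then "high" else "medium")
  rw [matched_grouped, min_grouped, sevMapA_items_grouped, List.append_assoc,
      sevLoopA_const, sevLoopA_const]
  rw [show medKeys.map (fun k => (k, "medium")) =
        medKeys.map (fun k => (k, "medium")) ++ [] from (List.append_nil _).symm,
      sevLoopA_const]
  by_cases hc : critKeys.any (fun k => PySem.Str.isIn k vl) = true
  · rw [if_pos hc, if_pos hc]; rfl
  · rw [if_neg hc, if_neg hc]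
    by_cases hh : highKeys.any (fun k => PySem.Str.isIn k vl) = true
    · rw [if_pos hh, if_pos hh]; rfl
    · rw [if_neg hh, if_neg hh]
      by_cases hm : medKeys.any (fun k => PySem.Str.isIn k vl) = true
      · rw [if_pos hm]; rfl
      · rw [if_neg hm]; rfl

-- ===== VERDICT (by name: the statement is the Claim_ definition above) =====
theorem map_severity_py_spec : Claim_equal_map_severity_py := by
  intro vuln_type _
  unfold Spec_map_severity_py map_severity_py map_severity_py_alt
  exact core_eq _
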